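-- pv_equiv track=rewrite | github.com/cbtolson/ensemblerna_webserver | wsgi/rnavis/erna/DBAnalysis.py | _findLoop
-- ===== SOURCE A (Python) =====
-- def _findLoop(left, right, s):
--     if right+1 > len(s)-1 or left-1 < 0:
--         loop = [left, right, s[left:right].count("(")*2]
--         return loop
--     elif s[right+1] == '(' or s[left-1] == ')':
--         loop = [left, right, s[left:right].count("(")*2]
--         return loop
--     elif s[right+1] == '.' or s[left-1] == '.':
--         loop = [left, right, s[left:right].count("(")*2]
--         return  loop
--     else:
--         loop = _findLoop(left-1, right+1, s)
--         return loop
-- ===== SOURCE B (Python) =====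
-- def _findLoop(left, right, s):
--     # Iterative re-implementation: scan an offset j outward until the merged
--     # stop condition fires, then build the (single) result once.
--     n = len(s)
--     j = 0
--     while not (right + j + 1 > n - 1 or left - j - 1 < 0
--                or s[right + j + 1] in '(.' or s[left - j - 1] in ').'):
--         j += 1
--     l, r = left - j, right + j
--     return [l, r, s[l:r].count("(") * 2]
-- ===== Notes on version B (the rewrite author's own statement) =====
-- stated objective: simpler
-- what changed: The tail recursion carrying (left,right) and its three identical-valued base cases are replaced by one iterative loop over an expansion offset j with a single merged stop condition and a single return built once at the end.
import Mathlib
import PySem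

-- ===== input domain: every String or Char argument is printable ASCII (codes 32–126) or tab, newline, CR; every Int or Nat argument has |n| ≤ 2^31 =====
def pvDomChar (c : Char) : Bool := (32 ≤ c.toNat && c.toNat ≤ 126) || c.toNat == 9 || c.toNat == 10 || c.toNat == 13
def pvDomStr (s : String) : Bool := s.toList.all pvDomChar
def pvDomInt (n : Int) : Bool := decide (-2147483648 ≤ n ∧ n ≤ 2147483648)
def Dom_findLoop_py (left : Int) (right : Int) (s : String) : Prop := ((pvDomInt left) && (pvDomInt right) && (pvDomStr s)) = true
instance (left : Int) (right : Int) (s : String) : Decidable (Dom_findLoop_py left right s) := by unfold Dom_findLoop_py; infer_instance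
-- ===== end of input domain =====

-- B replaces A's tail recursion over (left,right) by one iterative offset loop with a
-- single merged stop condition and a single result built once (objective: simpler).
-- The shared result expression [l, r, s[l:r].count("(")*2] of both sources:
def pvVal (l : Int) (r : Int) (s : String) : List Int :=
  [l, r, (PySem.Str.count (PySem.Str.slice s (some l) (some r)) "(" : Int) * 2]

-- ===== PORT A =====
def findLoop_py (left : Int) (right : Int) (s : String) : List Int :=
  if h1 : right + 1 > PySem.Str.len s - 1 ∨ left - 1 < 0 then
    pvVal left right s
  else if PySem.Str.pyGet? s (right + 1) = some '(' ∨ PySem.Str.pyGet? s (left - 1) = some ')' then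
    pvVal left right s
  else if PySem.Str.pyGet? s (right + 1) = some '.' ∨ PySem.Str.pyGet? s (left - 1) = some '.' then
    pvVal left right s
  else
    findLoop_py (left - 1) (right + 1) s
termination_by left.toNat
decreasing_by
  simp only [not_or, not_lt] at h1
  omega

-- ===== PORT B =====
-- B's merged stop condition (end-of-string / left edge / adjacent '(' '.' on the right / ')' '.' on the left)
def pvStop (l : Int) (r : Int) (s : String) : Bool :=
  decide (r + 1 > PySem.Str.len s - 1) || decide (l - 1 < 0) ||
  (PySem.Str.pyGet? s (r + 1) == some '(') || (PySem.Str.pyGet? s (r + 1) == some '.') ||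
  (PySem.Str.pyGet? s (l - 1) == some ')') || (PySem.Str.pyGet? s (l - 1) == some '.')

-- B's `while` loop: grow the offset j until the stop condition fires
def pvSteps (left : Int) (right : Int) (s : String) (j : Int) : Int :=
  if pvStop (left - j) (right + j) s then j
  else pvSteps left right s (j + 1)
termination_by (left - j).toNat
decreasing_by
  rename_i h
  simp only [pvStop, Bool.or_eq_true, decide_eq_true_eq, not_or, not_lt] at h
  omega

def findLoop_py_alt (left : Int) (right : Int) (s : String) : List Int :=
  let j := pvSteps left right s 0
  pvVal (left - j) (right + j) s

-- ===== PRECONDITION & SPEC =====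
-- Pre_ excludes exactly the inputs on which Python A raises IndexError (s[right+1] or
-- s[left-1] evaluated with the index outside [-len(s), len(s)-1]).
def Pre_findLoop_py (left : Int) (right : Int) (s : String) : Prop :=
  ¬ (1 ≤ left ∧ right + 1 ≤ PySem.Str.len s - 1 ∧
      (right + 1 < -(PySem.Str.len s) ∨
       (PySem.Str.len s < left ∧ PySem.Str.pyGet? s (right + 1) ≠ some '(')))
instance (left : Int) (right : Int) (s : String) : Decidable (Pre_findLoop_py left right s) := by
  unfold Pre_findLoop_py; infer_instance

def pvWitness_findLoop_py : Int × Int × String := (2, 3, "((.))")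

def Spec_findLoop_py (left : Int) (right : Int) (s : String) (out : List Int) : Prop := out = findLoop_py_alt left right s
instance (left : Int) (right : Int) (s : String) (out : List Int) : Decidable (Spec_findLoop_py left right s out) := by unfold Spec_findLoop_py; infer_instance

-- ===== CLAIM (what is proved, stated in full; the proofs are below) =====
def Claim_equal_findLoop_py : Prop := ∀ (left : Int) (right : Int) (s : String), Dom_findLoop_py left right s → Pre_findLoop_py left right s → Spec_findLoop_py left right s (findLoop_py left right s)

-- ===== LEMMAS AND PROOFS =====

-- A's three-way branch condition is exactly B's merged stop condition
lemma pvStop_iff (l r : Int) (s : String) :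
    pvStop l r s = true ↔
      ((r + 1 > PySem.Str.len s - 1 ∨ l - 1 < 0) ∨
       (PySem.Str.pyGet? s (r + 1) = some '(' ∨ PySem.Str.pyGet? s (l - 1) = some ')') ∨
       (PySem.Str.pyGet? s (r + 1) = some '.' ∨ PySem.Str.pyGet? s (l - 1) = some '.')) := by
  simp only [pvStop, Bool.or_eq_true, decide_eq_true_eq, beq_iff_eq]
  tauto

lemma pvSteps_stop (left right j : Int) (s : String)
    (h : pvStop (left - j) (right + j) s = true) : pvSteps left right s j = j := by
  rw [pvSteps, if_pos h]

lemma pvSteps_go (left right j : Int) (s : String)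
    (h : pvStop (left - j) (right + j) s = false) :
    pvSteps left right s j = pvSteps left right s (j + 1) := by
  rw [pvSteps]
  rw [if_neg (by simp [h])]

-- shifting the loop's base point by one step commutes with one iteration
lemma pvSteps_shift (s : String) (left right : Int) :
    ∀ (n : Nat) (j : Int), (left - j).toNat ≤ n →
      pvSteps left right s (j + 1) = pvSteps (left - 1) (right + 1) s j + 1 := by
  intro n
  induction n with
  | zero =>
    intro j hj
    have h1 : pvStop (left - (j + 1)) (right + (j + 1)) s = true := by
      rw [pvStop_iff]; left; right; omega
    have h2 : pvStop (left - 1 - j) (right + 1 + j) s = true := by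
      rw [pvStop_iff]; left; right; omega
    rw [pvSteps_stop _ _ _ _ h1, pvSteps_stop _ _ _ _ h2]
  | succ n ih =>
    intro j hj
    have harg1 : left - 1 - j = left - (j + 1) := by ring
    have harg2 : right + 1 + j = right + (j + 1) := by ring
    by_cases hstop : pvStop (left - (j + 1)) (right + (j + 1)) s = true
    · rw [pvSteps_stop _ _ _ _ hstop, pvSteps_stop _ _ _ _ (by rw [harg1, harg2]; exact hstop)]
    · have hstop' := Bool.eq_false_iff.mpr hstop
      have hge : 0 ≤ left - (j + 1) - 1 := by
        by_contra hc
        exact hstop ((pvStop_iff _ _ _).mpr (Or.inl (Or.inr (by omega))))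
      rw [pvSteps_go left right (j + 1) s hstop',
        pvSteps_go (left - 1) (right + 1) j s (by rw [harg1, harg2]; exact hstop')]
      exact ih (j + 1) (by omega)

lemma findLoop_eq (s : String) :
    ∀ (n : Nat) (left right : Int), left.toNat ≤ n →
      findLoop_py left right s = findLoop_py_alt left right s := by
  intro n
  induction n with
  | zero =>
    intro left right hle
    have h0 : pvStop (left - 0) (right + 0) s = true := by
      rw [pvStop_iff]; left; right; omega
    have hA : right + 1 > PySem.Str.len s - 1 ∨ left - 1 < 0 := Or.inr (by omega)
    rw [findLoop_py]
    rw [dif_pos hA]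
    simp [findLoop_py_alt, pvSteps_stop _ _ _ _ h0]
  | succ n ih =>
    intro left right hle
    rw [findLoop_py]
    by_cases h1 : right + 1 > PySem.Str.len s - 1 ∨ left - 1 < 0
    · rw [dif_pos h1]
      have h0 : pvStop (left - 0) (right + 0) s = true := by
        rw [pvStop_iff]; left; simpa using h1
      simp [findLoop_py_alt, pvSteps_stop _ _ _ _ h0]
    · rw [dif_neg h1]
      by_cases h2 : PySem.Str.pyGet? s (right + 1) = some '(' ∨ PySem.Str.pyGet? s (left - 1) = some ')'
      · rw [if_pos h2]
        have h0 : pvStop (left - 0) (right + 0) s = true := by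
          rw [pvStop_iff]; right; left; simpa using h2
        simp [findLoop_py_alt, pvSteps_stop _ _ _ _ h0]
      · rw [if_neg h2]
        by_cases h3 : PySem.Str.pyGet? s (right + 1) = some '.' ∨ PySem.Str.pyGet? s (left - 1) = some '.'
        · rw [if_pos h3]
          have h0 : pvStop (left - 0) (right + 0) s = true := by
            rw [pvStop_iff]; right; right; simpa using h3
          simp [findLoop_py_alt, pvSteps_stop _ _ _ _ h0]
        · rw [if_neg h3]
          have h0 : pvStop (left - 0) (right + 0) s = false := by
            rw [Bool.eq_false_iff]
            intro hc
            rcases (pvStop_iff _ _ _).mp hc with h | h | h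
            · exact h1 (by simpa using h)
            · exact h2 (by simpa using h)
            · exact h3 (by simpa using h)
          have hleft : 0 ≤ left - 1 := by
            rcases not_or.mp h1 with ⟨-, hb⟩
            omega
          rw [ih (left - 1) (right + 1) (by omega)]
          simp only [findLoop_py_alt]
          have hJ : pvSteps left right s 0 = pvSteps (left - 1) (right + 1) s 0 + 1 := by
            rw [pvSteps_go left right 0 s h0,
              pvSteps_shift s left right (left - 0).toNat 0 le_rfl]
          rw [hJ]
          have e1 : left - (pvSteps (left - 1) (right + 1) s 0 + 1)
              = left - 1 - pvSteps (left - 1) (right + 1) s 0 := by ring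
          have e2 : right + (pvSteps (left - 1) (right + 1) s 0 + 1)
              = right + 1 + pvSteps (left - 1) (right + 1) s 0 := by ring
          rw [e1, e2]

-- ===== VERDICT (by name: the statement is the Claim_ definition above) =====
theorem findLoop_py_spec : Claim_equal_findLoop_py := by
  intro left right s _ _
  unfold Spec_findLoop_py
  exact findLoop_eq s left.toNat left right le_rfl
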